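-- pv_equiv track=rewrite | github.com/abjugard/advent-of-code-2015 | src/day11-corporate_policy.py | has_pairs
-- ===== SOURCE A (Python) =====
-- from itertools import pairwise
--
-- def has_pairs(password):
--   for i, (c, cn) in enumerate(pairwise(password)):
--     if c != cn:
--       continue
--     for c2, c2n in pairwise(password[i+2:]):
--       if c != c2 and c2 == c2n:
--         return True
--   return False
-- ===== SOURCE B (Python) =====
-- from itertools import groupby
--
-- def has_pairs(password):
--     doubled = {c for c, g in groupby(password) if len(list(g)) > 1}
--     return len(doubled) >= 2
-- ===== Notes on version B (the rewrite author's own statement) =====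
-- stated objective: simpler
-- what changed: Replaces A's nested positional pairwise rescans (for each double, rescan the suffix for a second double of a different letter) with one itertools.groupby pass collecting letters of runs longer than 1 into a set and testing len >= 2.
import Mathlib
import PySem

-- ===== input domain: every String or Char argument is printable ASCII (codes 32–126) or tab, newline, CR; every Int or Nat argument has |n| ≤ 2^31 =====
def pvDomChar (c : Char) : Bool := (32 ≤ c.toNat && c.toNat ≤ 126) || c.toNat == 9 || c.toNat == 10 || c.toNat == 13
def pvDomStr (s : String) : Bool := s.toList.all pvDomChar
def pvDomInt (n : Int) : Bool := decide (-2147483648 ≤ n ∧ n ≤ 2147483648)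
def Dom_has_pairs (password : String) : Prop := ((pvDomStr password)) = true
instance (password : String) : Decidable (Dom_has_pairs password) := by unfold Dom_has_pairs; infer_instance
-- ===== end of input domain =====

-- B replaces A's O(n^2) nested positional pairwise rescans by one O(n) groupby pass collecting doubled letters into a set.

-- ===== PORT A =====
-- itertools.pairwise
def pvPairwise (l : List Char) : List (Char × Char) := l.zip l.tail

def has_pairs (password : String) : Bool :=
  let cs := password.toList
  (PySem.List.enumerate (pvPairwise cs) 0).any (fun p =>
    if p.2.1 ≠ p.2.2 then false
    else (pvPairwise (PySem.List.slice cs (some (p.1 + 2)) none)).any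
      (fun q => decide (p.2.1 ≠ q.1) && (q.1 == q.2)))

-- ===== PORT B =====
-- itertools.groupby: maximal runs of equal elements as (key, group) pairs
def pvGroupby (l : List Char) : List (Char × List Char) :=
  match l with
  | [] => []
  | c :: rest =>
    match pvGroupby rest with
    | [] => [(c, [c])]
    | (k, g) :: t => if c = k then (k, c :: g) :: t else (c, [c]) :: (k, g) :: t

def has_pairs_alt (password : String) : Bool :=
  let doubled : PySem.Set Char :=
    PySem.Set.ofList (((pvGroupby password.toList).filter (fun p => p.2.length > 1)).map (·.1))
  decide (2 ≤ doubled.length)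

-- ===== PRECONDITION & SPEC =====
def Spec_has_pairs (password : String) (out : Bool) : Prop := out = has_pairs_alt password
instance (password : String) (out : Bool) : Decidable (Spec_has_pairs password out) := by unfold Spec_has_pairs; infer_instance

-- ===== CLAIM (what is proved, stated in full; the proofs are below) =====
def Claim_equal_has_pairs : Prop := ∀ (password : String), Dom_has_pairs password → Spec_has_pairs password (has_pairs password)

-- ===== LEMMAS AND PROOFS =====

-- common characterisation: two distinct letters each occurring as an adjacent double
def TwoDoubles (cs : List Char) : Prop :=
  ∃ c d, c ≠ d ∧ (c, c) ∈ pvPairwise cs ∧ (d, d) ∈ pvPairwise cs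

theorem pvPairwise_getElem (cs : List Char) (k : Nat) (h : k < (pvPairwise cs).length) :
    (pvPairwise cs)[k] = (cs[k]'(by simp [pvPairwise] at h; omega),
                          cs[k+1]'(by simp [pvPairwise] at h; omega)) := by
  simp [pvPairwise, List.getElem_tail]

theorem pvPairwise_drop (cs : List Char) (n : Nat) :
    pvPairwise (cs.drop n) = (pvPairwise cs).drop n := by
  induction n generalizing cs with
  | zero => simp
  | succ m ih =>
    cases cs with
    | nil => simp [pvPairwise]
    | cons a tl =>
      simp only [List.drop_succ_cons]
      rw [ih]
      cases tl <;> simp [pvPairwise]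

theorem ite_ne_false_eq (a b : Char) (x : Bool) :
    (if a ≠ b then false else x) = (decide (a = b) && x) := by
  by_cases h : a = b <;> simp [h]

theorem has_pairs_eq_exists (password : String) :
    has_pairs password = true ↔
      ∃ (k : Nat) (hk : k < (pvPairwise password.toList).length),
        (pvPairwise password.toList)[k].1 = (pvPairwise password.toList)[k].2 ∧
        ∃ q ∈ (pvPairwise password.toList).drop (k + 2),
          (pvPairwise password.toList)[k].1 ≠ q.1 ∧ q.1 = q.2 := by
  simp only [has_pairs, ite_ne_false_eq, List.any_eq_true, Bool.and_eq_true,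
    decide_eq_true_iff, beq_iff_eq]
  constructor
  · rintro ⟨x, hx, hfx⟩
    rw [PySem.List.mem_enumerate_iff] at hx
    obtain ⟨k, hk, rfl⟩ := hx
    dsimp only at hfx
    obtain ⟨heq, q, hq, hq1, hq2⟩ := hfx
    rw [show ((0 : Int) + ↑k + 2) = ((k + 2 : Nat) : Int) by push_cast; ring,
      PySem.List.slice_from_natCast, pvPairwise_drop] at hq
    exact ⟨k, hk, heq, q, hq, hq1, hq2⟩
  · rintro ⟨k, hk, heq, q, hq, hq1, hq2⟩
    refine ⟨(0 + (k : Int), (pvPairwise password.toList)[k]),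
      (PySem.List.mem_enumerate_iff _ _ _).mpr ⟨k, hk, rfl⟩, ?_⟩
    dsimp only
    rw [show ((0 : Int) + ↑k + 2) = ((k + 2 : Nat) : Int) by push_cast; ring,
      PySem.List.slice_from_natCast, pvPairwise_drop]
    exact ⟨heq, q, hq, hq1, hq2⟩

-- one ordered pair of indices yields A's nested-scan witness
theorem aux_ordered (cs : List Char) (c d : Char) (i j : Nat)
    (hi : i < (pvPairwise cs).length) (hj : j < (pvPairwise cs).length) (hij : i < j)
    (hc : (pvPairwise cs)[i] = (c, c)) (hd : (pvPairwise cs)[j] = (d, d)) (hcd : c ≠ d) :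
    ∃ (k : Nat) (hk : k < (pvPairwise cs).length),
      (pvPairwise cs)[k].1 = (pvPairwise cs)[k].2 ∧
      ∃ q ∈ (pvPairwise cs).drop (k + 2), (pvPairwise cs)[k].1 ≠ q.1 ∧ q.1 = q.2 := by
  have hj2 : i + 2 ≤ j := by
    rcases Nat.lt_or_ge j (i + 2) with h | h
    · exfalso
      have hji : j = i + 1 := by omega
      subst hji
      have h1 := (pvPairwise_getElem cs i hi).symm.trans hc
      have h2 := (pvPairwise_getElem cs (i + 1) hj).symm.trans hd
      have e1 := congrArg Prod.snd h1
      have e2 := congrArg Prod.fst h2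
      dsimp only at e1 e2
      exact hcd (e1.symm.trans e2)
    · exact h
  refine ⟨i, hi, by rw [hc], (d, d), ?_, by rw [hc]; exact hcd, rfl⟩
  rw [List.mem_iff_getElem]
  refine ⟨j - (i + 2), by simp [List.length_drop]; omega, ?_⟩
  rw [List.getElem_drop]
  have hidx : i + 2 + (j - (i + 2)) = j := by omega
  simp_rw [hidx]
  exact hd

theorem has_pairs_iff (password : String) :
    has_pairs password = true ↔ TwoDoubles password.toList := by
  rw [has_pairs_eq_exists]
  constructor
  · rintro ⟨k, hk, heq, q, hq, hq1, hq2⟩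
    refine ⟨(pvPairwise password.toList)[k].1, q.1, hq1, ?_, ?_⟩
    · have : (pvPairwise password.toList)[k]
          = ((pvPairwise password.toList)[k].1, (pvPairwise password.toList)[k].1) := by
        rw [Prod.ext_iff]; exact ⟨rfl, heq.symm⟩
      rw [← this]; exact List.getElem_mem hk
    · have : q = (q.1, q.1) := by rw [Prod.ext_iff]; exact ⟨rfl, hq2.symm⟩
      rw [← this]; exact List.mem_of_mem_drop hq
  · rintro ⟨c, d, hcd, hc, hd⟩
    obtain ⟨i, hi, hci⟩ := List.getElem_of_mem hc
    obtain ⟨j, hj, hdj⟩ := List.getElem_of_mem hd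
    rcases Nat.lt_trichotomy i j with h | h | h
    · exact aux_ordered _ c d i j hi hj h hci hdj hcd
    · exfalso; subst h; rw [hci] at hdj
      exact hcd (Prod.ext_iff.mp hdj).1
    · exact aux_ordered _ d c j i hj hi h hdj hci hcd.symm

-- groupby head shape
theorem pvGroupby_cons (x : Char) (xs : List Char) :
    ∃ g t, pvGroupby (x :: xs) = (x, x :: g) :: t := by
  cases h : pvGroupby xs with
  | nil => exact ⟨[], [], by simp [pvGroupby, h]⟩
  | cons p t =>
    obtain ⟨k, g⟩ := p
    by_cases hx : x = k
    · exact ⟨g, t, by simp [pvGroupby, h, hx]⟩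
    · exact ⟨[], (k, g) :: t, by simp [pvGroupby, h, hx]⟩

theorem mem_groupby_iff (cs : List Char) (c : Char) :
    (∃ p ∈ pvGroupby cs, p.1 = c ∧ p.2.length > 1) ↔ (c, c) ∈ pvPairwise cs := by
  induction cs with
  | nil => simp [pvGroupby, pvPairwise]
  | cons a tl ih =>
    cases tl with
    | nil => simp [pvGroupby, pvPairwise]
    | cons b rest =>
      obtain ⟨g, t, hg⟩ := pvGroupby_cons b rest
      rw [hg] at ih
      have hpw : pvPairwise (a :: b :: rest) = (a, b) :: pvPairwise (b :: rest) := by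
        simp [pvPairwise]
      have hstep : pvGroupby (a :: b :: rest) =
          (if a = b then (b, a :: b :: g) :: t else (a, [a]) :: (b, b :: g) :: t) := by
        conv_lhs => rw [pvGroupby]
        rw [hg]
      by_cases hab : a = b
      · subst hab
        rw [hstep, if_pos rfl, hpw]
        simp only [List.mem_cons] at *
        constructor
        · rintro ⟨p, hp | hp, h1, h2⟩
          · left; rw [← h1, hp]
          · exact Or.inr (ih.mp ⟨p, Or.inr hp, h1, h2⟩)
        · rintro (h | h)
          · have hc : c = a := by
              have := Prod.ext_iff.mp h; exact this.1
            exact ⟨(a, a :: a :: g), Or.inl rfl, hc.symm, by simp⟩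
          · obtain ⟨p, hp, h1, h2⟩ := ih.mpr h
            rcases hp with hp | hp
            · exact ⟨(a, a :: a :: g), Or.inl rfl, by rw [hp] at h1; exact h1, by simp⟩
            · exact ⟨p, Or.inr hp, h1, h2⟩
      · rw [hstep, if_neg hab, hpw]
        simp only [List.mem_cons] at *
        constructor
        · rintro ⟨p, hp | hp, h1, h2⟩
          · rw [hp] at h2; simp at h2
          · exact Or.inr (ih.mp ⟨p, hp, h1, h2⟩)
        · rintro (h | h)
          · exfalso
            have h1 := (Prod.ext_iff.mp h).1
            have h2 := (Prod.ext_iff.mp h).2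
            exact hab (h1.symm.trans h2)
          · obtain ⟨p, hp, h1, h2⟩ := ih.mpr h
            exact ⟨p, Or.inr hp, h1, h2⟩

theorem nodup_two_le_iff {α : Type} (l : List α) (hnd : l.Nodup) :
    2 ≤ l.length ↔ ∃ a b, a ≠ b ∧ a ∈ l ∧ b ∈ l := by
  constructor
  · intro h
    match l, h with
    | a :: b :: t, _ =>
      refine ⟨a, b, ?_, by simp, by simp⟩
      intro hab
      simp [hab] at hnd
  · rintro ⟨a, b, hab, ha, hb⟩
    match l with
    | [] => simp at ha
    | [x] => simp at ha hb; subst ha; subst hb; exact absurd rfl hab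
    | _ :: _ :: _ => simp

theorem mem_dbl_iff (cs : List Char) (c : Char) :
    c ∈ ((pvGroupby cs).filter (fun p => p.2.length > 1)).map (·.1) ↔ (c, c) ∈ pvPairwise cs := by
  rw [← mem_groupby_iff]
  simp only [List.mem_map, List.mem_filter]
  constructor
  · rintro ⟨p, ⟨hp, hl⟩, hc⟩; exact ⟨p, hp, hc, by simpa using hl⟩
  · rintro ⟨p, hp, hc, hl⟩; exact ⟨p, ⟨hp, by simpa using hl⟩, hc⟩

theorem has_pairs_alt_iff (password : String) :
    has_pairs_alt password = true ↔ TwoDoubles password.toList := by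
  unfold has_pairs_alt TwoDoubles
  simp only [decide_eq_true_iff]
  rw [nodup_two_le_iff _ (PySem.Set.nodup_ofList _)]
  simp only [PySem.Set.mem_ofList, mem_dbl_iff]

-- ===== VERDICT (by name: the statement is the Claim_ definition above) =====
theorem has_pairs_spec : Claim_equal_has_pairs := by
  intro password _
  unfold Spec_has_pairs
  exact Bool.eq_iff_iff.mpr ((has_pairs_iff password).trans (has_pairs_alt_iff password).symm)
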